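-- pv_equiv track=rewrite | github.com/posl/comment_recommendation | script/mod_gen/2_time/zh/149_D/2.py | get_max_score
-- ===== SOURCE A (Python) =====
-- def get_max_score(n, k, r, s, p, t):
--     max_score = 0
--     for i in range(n):
--         if t[i] == 'r':
--             max_score += p
--         elif t[i] == 's':
--             max_score += r
--         else:
--             max_score += s
--     for i in range(n-k):
--         if t[i] == 'r':
--             if t[i+k] == 'r':
--                 max_score -= p
--             elif t[i+k] == 's':
--                 max_score -= r
--             else:
--                 max_score -= s
--         elif t[i] == 's':
--             if t[i+k] == 'r':
--                 max_score -= p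
--             elif t[i+k] == 's':
--                 max_score -= r
--             else:
--                 max_score -= s
--         else:
--             if t[i+k] == 'r':
--                 max_score -= p
--             elif t[i+k] == 's':
--                 max_score -= r
--             else:
--                 max_score -= s
--     return max_score
-- ===== SOURCE B (Python) =====
-- def get_max_score(n, k, r, s, p, t):
--     # In an optimal play every window of k consecutive hands can repeat a
--     # winning hand only once, so only the first min(n, k) positions score:
--     # A's full-sum-then-subtract-suffix telescopes to this prefix sum.
--     value = {'r': p, 's': r}
--     return sum(value.get(c, s) for c in t[:max(0, min(n, k))])
-- ===== Notes on version B (the rewrite author's own statement) =====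
-- stated objective: simpler
-- what changed: A's subtract-the-shifted-suffix second loop cancels those terms from the full sum, so B just sums the score values of the first min(n,k) entries in one slice pass with a lookup table.
-- outside the precondition, e.g. on get_max_score(2, -1, 1, 2, 3, ['r', 's', 'r']): A returns -3, B returns 0
import Mathlib
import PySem

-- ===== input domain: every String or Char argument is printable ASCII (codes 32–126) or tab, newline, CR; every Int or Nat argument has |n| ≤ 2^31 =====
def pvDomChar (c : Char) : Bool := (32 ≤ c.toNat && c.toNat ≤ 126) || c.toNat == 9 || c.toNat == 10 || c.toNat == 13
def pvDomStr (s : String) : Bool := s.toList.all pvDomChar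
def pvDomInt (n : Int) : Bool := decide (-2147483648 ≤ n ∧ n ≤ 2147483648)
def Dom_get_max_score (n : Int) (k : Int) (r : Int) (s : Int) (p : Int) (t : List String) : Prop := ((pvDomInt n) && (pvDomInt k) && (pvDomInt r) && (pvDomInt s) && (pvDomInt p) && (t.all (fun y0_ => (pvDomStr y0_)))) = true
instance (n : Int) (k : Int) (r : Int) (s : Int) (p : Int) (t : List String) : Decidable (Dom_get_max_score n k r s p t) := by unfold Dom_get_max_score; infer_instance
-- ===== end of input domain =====

-- B replaces A's full-sum-then-subtract-shifted-suffix with a single prefix-sum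
-- over the first min(n, k) entries (simpler; A's two passes telescope to it).

-- ===== PORT A =====
-- literal port of A; pyGet? is Python indexing (the .getD "" default is never
-- reached inside Pre_, where every index is in range)
def get_max_score (n : Int) (k : Int) (r : Int) (s : Int) (p : Int) (t : List String) : Int :=
  let m1 : Int := (PySem.List.pyRange 0 n 1).foldl (fun acc i =>
      let c := (PySem.List.pyGet? t i).getD ""
      if c = "r" then acc + p else if c = "s" then acc + r else acc + s) 0
  (PySem.List.pyRange 0 (n - k) 1).foldl (fun acc i =>
      let c := (PySem.List.pyGet? t i).getD ""
      let d := (PySem.List.pyGet? t (i + k)).getD ""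
      if c = "r" then
        (if d = "r" then acc - p else if d = "s" then acc - r else acc - s)
      else if c = "s" then
        (if d = "r" then acc - p else if d = "s" then acc - r else acc - s)
      else
        (if d = "r" then acc - p else if d = "s" then acc - r else acc - s)) m1

-- ===== PORT B =====
def get_max_score_alt (n : Int) (k : Int) (r : Int) (s : Int) (p : Int) (t : List String) : Int :=
  let value : PySem.Dict String Int := PySem.Dict.ofList [("r", p), ("s", r)]
  (PySem.List.slice t none (some (max 0 (min n k)))).foldl
    (fun acc c => acc + PySem.Dict.getD value c s) 0

-- ===== PRECONDITION & SPEC =====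
-- Pre_ excludes inputs where A raises IndexError (n > len(t); and negative k
-- with k < n, where range(n-k) overruns the list) and the remaining negative-k
-- inputs with k < n, where A returns a value only through Python
-- negative-index wraparound — an accident of A's implementation on a cooldown
-- that is never negative (k < 0 with n ≤ k, where both loops are empty, stays inside).
def Pre_get_max_score (n : Int) (k : Int) (r : Int) (s : Int) (p : Int) (t : List String) : Prop :=
  (0 ≤ k ∨ n ≤ k) ∧ n ≤ t.length
instance (n : Int) (k : Int) (r : Int) (s : Int) (p : Int) (t : List String) : Decidable (Pre_get_max_score n k r s p t) := by unfold Pre_get_max_score; infer_instance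

def pvWitness_get_max_score : Int × Int × Int × Int × Int × List String :=
  (3, 2, 1, 5, 3, ["r", "s", "p"])

def Spec_get_max_score (n : Int) (k : Int) (r : Int) (s : Int) (p : Int) (t : List String) (out : Int) : Prop := out = get_max_score_alt n k r s p t
instance (n : Int) (k : Int) (r : Int) (s : Int) (p : Int) (t : List String) (out : Int) : Decidable (Spec_get_max_score n k r s p t out) := by unfold Spec_get_max_score; infer_instance

-- ===== CLAIM (what is proved, stated in full; the proofs are below) =====
def Claim_equal_get_max_score : Prop := ∀ (n : Int) (k : Int) (r : Int) (s : Int) (p : Int) (t : List String), Dom_get_max_score n k r s p t → Pre_get_max_score n k r s p t → Spec_get_max_score n k r s p t (get_max_score n k r s p t)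

-- ===== LEMMAS AND PROOFS =====

-- the score of one hand (the common value of A's three branches)
def pvVal (r s p : Int) (c : String) : Int :=
  if c = "r" then p else if c = "s" then r else s

-- t[j] with Python's out-of-range replaced by "" (never reached where it matters)
def pvNth (t : List String) (j : Nat) : String := (t[j]?).getD ""

-- prefix sum of scores over indices [0, m)
def pvS (r s p : Int) (t : List String) (m : Nat) : Int :=
  ((List.range m).map (fun j => pvVal r s p (pvNth t j))).sum

theorem pvVal_dict (r s p : Int) (c : String) :
    PySem.Dict.getD (PySem.Dict.ofList [("r", p), ("s", r)]) c s = pvVal r s p c := by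
  have hof : PySem.Dict.ofList [("r", p), ("s", r)]
      = PySem.Dict.mk [("r", p), ("s", r)] := rfl
  rw [hof]
  by_cases h1 : c = "r"
  · subst h1; simp [PySem.Dict.getD, PySem.Dict.get?_mk_cons, pvVal]
  by_cases h2 : c = "s"
  · subst h2
    simp [PySem.Dict.getD, PySem.Dict.get?_mk_cons, pvVal]
  · have b1 : (("r" : String) == c) = false := beq_eq_false_iff_ne.mpr (Ne.symm h1)
    have b2 : (("s" : String) == c) = false := beq_eq_false_iff_ne.mpr (Ne.symm h2)
    simp [PySem.Dict.getD, PySem.Dict.get?, b1, b2, pvVal, h1, h2]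

theorem pvTake_range (t : List String) (m : Nat) (hm : m ≤ t.length) :
    t.take m = (List.range m).map (fun j => pvNth t j) := by
  apply List.ext_getElem
  · simp [hm]
  · intro i h1 h2
    have hi : i < m := by simpa [hm] using h1
    have hit : i < t.length := lt_of_lt_of_le hi hm
    simp [pvNth, List.getElem?_eq_getElem hit]

-- A's first loop (over any index list staying in range) is a sum of scores
theorem pvFold1 (r s p : Int) (t : List String) (l : List Nat) (init : Int)
    (h : ∀ j ∈ l, j < t.length) :
    l.foldl (fun (acc : Int) (j : Nat) =>
      let c := (PySem.List.pyGet? t ((0 : Int) + (j : Int))).getD ""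
      if c = "r" then acc + p else if c = "s" then acc + r else acc + s) init
    = init + (l.map (fun j => pvVal r s p (pvNth t j))).sum := by
  induction l generalizing init with
  | nil => simp
  | cons j l ih =>
    have hget : PySem.List.pyGet? t ((0 : Int) + (j : Int)) = t[j]? := by
      rw [zero_add, PySem.List.pyGet?_natCast]
    rw [List.foldl_cons, ih _ (fun x hx => h x (List.mem_cons_of_mem _ hx))]
    simp only [List.map_cons, List.sum_cons, hget, pvVal, pvNth]
    split_ifs <;> ring

-- A's second loop: every branch subtracts the same score of t[i+k]
theorem pvFold2 (k r s p : Int) (t : List String) (hk : 0 ≤ k)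
    (l : List Nat) (init : Int) :
    l.foldl (fun (acc : Int) (j : Nat) =>
      let c := (PySem.List.pyGet? t ((0 : Int) + (j : Int))).getD ""
      let d := (PySem.List.pyGet? t ((0 : Int) + (j : Int) + k)).getD ""
      if c = "r" then
        (if d = "r" then acc - p else if d = "s" then acc - r else acc - s)
      else if c = "s" then
        (if d = "r" then acc - p else if d = "s" then acc - r else acc - s)
      else
        (if d = "r" then acc - p else if d = "s" then acc - r else acc - s)) init
    = init - (l.map (fun j => pvVal r s p (pvNth t (j + k.toNat)))).sum := by
  induction l generalizing init with
  | nil => simp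
  | cons j l ih =>
    have hcast : (0 : Int) + (j : Int) + k = ((j + k.toNat : Nat) : Int) := by omega
    have hget : PySem.List.pyGet? t ((0 : Int) + (j : Int) + k) = t[j + k.toNat]? := by
      rw [hcast, PySem.List.pyGet?_natCast]
    rw [List.foldl_cons, ih]
    simp only [List.map_cons, List.sum_cons, hget, pvVal, pvNth]
    split_ifs <;> ring

-- splitting the prefix sum at k
theorem pvShift (n k r s p : Int) (t : List String) (hk : 0 ≤ k) (hkn : k ≤ n) :
    pvS r s p t n.toNat
      = pvS r s p t k.toNat
        + ((List.range (n - k).toNat).map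
            (fun j => pvVal r s p (pvNth t (j + k.toNat)))).sum := by
  have h : n.toNat = k.toNat + (n - k).toNat := by omega
  rw [pvS, h, List.range_add, List.map_append, List.sum_append]
  congr 1
  rw [List.map_map]
  congr 1
  apply List.map_congr_left
  intro j _
  simp [Nat.add_comm]

-- ===== VERDICT (by name: the statement is the Claim_ definition above) =====
theorem get_max_score_spec : Claim_equal_get_max_score := by
  intro n k r s p t _ hpre
  obtain ⟨hkor, hn⟩ := hpre
  show get_max_score n k r s p t = get_max_score_alt n k r s p t
  by_cases hk : 0 ≤ k
  case neg =>
    -- k < 0 and n ≤ k: every loop of A is empty and B's slice is empty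
    have hnk : n ≤ k := hkor.resolve_left hk
    unfold get_max_score get_max_score_alt
    rw [PySem.List.pyRange_one_eq_nil (by omega), PySem.List.pyRange_one_eq_nil (by omega),
      PySem.List.slice_to _ (le_max_left _ _)]
    have h0 : (max 0 (min n k)).toNat = 0 := by omega
    simp [h0]
  unfold get_max_score get_max_score_alt
  rw [PySem.List.pyRange_one 0 n, PySem.List.pyRange_one 0 (n - k),
    List.foldl_map, List.foldl_map]
  simp only [Int.sub_zero]
  rw [pvFold1 r s p t _ 0 (by intro j hj; have := List.mem_range.mp hj; omega),
    pvFold2 k r s p t hk]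
  have hlim : (0 : Int) ≤ max 0 (min n k) := le_max_left _ _
  have hL : (max 0 (min n k)).toNat ≤ t.length := by omega
  simp only [PySem.List.slice_to _ hlim, pvTake_range t _ hL, List.foldl_map,
    PySem.List.foldl_add]
  simp only [zero_add]
  have hB : ((List.range (max 0 (min n k)).toNat).map
      (fun j => PySem.Dict.getD (PySem.Dict.ofList [("r", p), ("s", r)]) (pvNth t j) s)).sum
      = pvS r s p t (max 0 (min n k)).toNat := by
    unfold pvS
    congr 1
    apply List.map_congr_left
    intro j _
    exact pvVal_dict r s p _
  rw [hB]
  by_cases hkn : k ≤ n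
  · have hmm : (max 0 (min n k)).toNat = k.toNat := by omega
    rw [hmm]
    have hS := pvShift n k r s p t hk hkn
    simp only [pvS] at hS ⊢
    linarith
  · have h0 : (n - k).toNat = 0 := by omega
    have hmm : (max 0 (min n k)).toNat = n.toNat := by omega
    simp [h0, hmm, pvS]
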